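-- pv_equiv track=rewrite | github.com/hvijaycse/HackerRank | Dsa Learning Series Codechef/Complexity Analysis + Basics Warm Up/Div_3.py | Mult3
-- ===== SOURCE A (Python) =====
-- def Mult3( K , d0, d1):
--     Pattern = [2,4,8,6]
--     Sum = d0 + d1
--     for i in range( K -2):
--         if not Sum % 10:
--             break
--         if  Sum %10 == 2:
--             Length = K - (i + 2)
--             Sum += 20*( Length // 4)
--             for i in range( Length %4):
--                 Sum += Pattern[i]
--             break
--         Sum += Sum % 10
--     if not Sum % 3:
--         return 'YES'
--     else:
--         return 'NO'
-- ===== SOURCE B (Python) =====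
-- def Mult3(K, d0, d1):
--     # The recurrence Sum += Sum % 10 only depends on Sum mod 30 (and adds its
--     # last digit), and its digit sequence becomes 4-periodic almost at once;
--     # walk the mod-30 state for at most 36 steps, then collapse the remaining
--     # steps with one 4-digit period window.
--     Sum = d0 + d1
--     steps = K - 2
--     inc = 0
--     s = Sum % 30
--     for _ in range(min(steps, 36)):
--         inc += s % 10
--         s = (s + s % 10) % 30
--     if steps > 36:
--         digs = []
--         cycle = 0
--         for _ in range(4):
--             d = s % 10
--             digs.append(d)
--             cycle += d
--             s = (s + d) % 30
--         q = (steps - 36) // 4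
--         r = (steps - 36) % 4
--         inc += q * cycle
--         for j in range(r):
--             inc += digs[j]
--     return 'YES' if (Sum + inc) % 3 == 0 else 'NO'
-- ===== Notes on version B (the rewrite author's own statement) =====
-- stated objective: alternative
-- what changed: B drops A's digit==2 test, Pattern table and 20*(Length//4) jump keyed to that digit; instead it iterates the recurrence on the state mod 30 (which determines every increment) for at most 36 steps and collapses all remaining steps with one measured 4-step period window (the digit sequence, having become even, is 4-periodic), using quotient/remainder of the remaining step count.
import Mathlib
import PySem

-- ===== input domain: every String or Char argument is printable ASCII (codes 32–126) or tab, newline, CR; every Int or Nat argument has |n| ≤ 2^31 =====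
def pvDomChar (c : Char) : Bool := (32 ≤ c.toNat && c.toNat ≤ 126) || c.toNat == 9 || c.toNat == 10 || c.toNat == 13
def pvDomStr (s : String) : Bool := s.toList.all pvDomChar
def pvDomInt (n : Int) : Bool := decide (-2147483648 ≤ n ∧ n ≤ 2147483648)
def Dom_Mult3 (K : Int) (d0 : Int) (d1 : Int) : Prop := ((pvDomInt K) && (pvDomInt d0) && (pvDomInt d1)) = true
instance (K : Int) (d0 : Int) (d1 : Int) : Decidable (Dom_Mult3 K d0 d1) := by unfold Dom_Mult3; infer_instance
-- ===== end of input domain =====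

-- B drops A's digit==2 test, Pattern table and 20*(Length//4) jump; it walks the
-- recurrence on the state mod 30 for at most 36 steps and collapses the rest with
-- one measured 4-step period window; objective: alternative.

-- ===== PORT A =====
-- loop 'for i in range(K-2)': n = remaining iterations, i = current index.
def mult3LoopA (K : Int) (Sum : Int) (i : Nat) : Nat → Int
  | 0 => Sum
  | Nat.succ m =>
    if PySem.Int.mod Sum 10 == 0 then Sum
    else if PySem.Int.mod Sum 10 == 2 then
      let Length : Int := K - ((i : Int) + 2)
      let Sum1 := Sum + 20 * PySem.Int.floordiv Length 4
      -- inner 'for i in range(Length % 4): Sum += Pattern[i]'; Length % 4 < 4,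
      -- so Pattern[i] is always in range and the IndexError path is unreachable.
      (PySem.List.pyRange 0 (PySem.Int.mod Length 4) 1).foldl
        (fun s j => s + ((PySem.List.pyGet? ([2, 4, 8, 6] : List Int) j).getD 0)) Sum1
    else mult3LoopA K (Sum + PySem.Int.mod Sum 10) (i + 1) m

def Mult3 (K : Int) (d0 : Int) (d1 : Int) : String :=
  let Sum := mult3LoopA K (d0 + d1) 0 (K - 2).toNat
  if PySem.Int.mod Sum 3 == 0 then "YES" else "NO"

-- ===== PORT B =====
def Mult3_alt (K : Int) (d0 : Int) (d1 : Int) : String :=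
  let Sum := d0 + d1
  let steps := K - 2
  -- 'for _ in range(min(steps, 36)): inc += s % 10; s = (s + s % 10) % 30'
  let p := (PySem.List.pyRange 0 (min steps 36) 1).foldl
      (fun (p : Int × Int) _ => (p.1 + PySem.Int.mod p.2 10,
        PySem.Int.mod (p.2 + PySem.Int.mod p.2 10) 30)) (0, PySem.Int.mod Sum 30)
  let inc :=
    if steps > 36 then
      -- 'for _ in range(4): d = s % 10; digs.append(d); cycle += d; s = (s + d) % 30'
      let w := (PySem.List.pyRange 0 4 1).foldl
          (fun (w : List Int × Int × Int) _ =>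
            let d := PySem.Int.mod w.2.2 10
            (w.1 ++ [d], w.2.1 + d, PySem.Int.mod (w.2.2 + d) 30))
          ([], 0, p.2)
      let q := PySem.Int.floordiv (steps - 36) 4
      let r := PySem.Int.mod (steps - 36) 4
      -- 'for j in range(r): inc += digs[j]'; r < 4 = len(digs), so digs[j] is
      -- always in range and the IndexError path is unreachable.
      (PySem.List.pyRange 0 r 1).foldl
        (fun acc j => acc + ((PySem.List.pyGet? w.1 j).getD 0)) (p.1 + q * w.2.1)
    else p.1
  if PySem.Int.mod (Sum + inc) 3 == 0 then "YES" else "NO"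

-- ===== PRECONDITION & SPEC =====
def Spec_Mult3 (K : Int) (d0 : Int) (d1 : Int) (out : String) : Prop := out = Mult3_alt K d0 d1
instance (K : Int) (d0 : Int) (d1 : Int) (out : String) : Decidable (Spec_Mult3 K d0 d1 out) := by unfold Spec_Mult3; infer_instance

-- ===== CLAIM (what is proved, stated in full; the proofs are below) =====
def Claim_equal_Mult3 : Prop := ∀ (K : Int) (d0 : Int) (d1 : Int), Dom_Mult3 K d0 d1 → Spec_Mult3 K d0 d1 (Mult3 K d0 d1)

-- ===== LEMMAS AND PROOFS =====

theorem mod_pos10 (s : Int) : PySem.Int.mod s 10 = s % 10 :=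
  PySem.Int.mod_eq_emod_of_pos (by norm_num)

theorem mod_pos30 (s : Int) : PySem.Int.mod s 30 = s % 30 :=
  PySem.Int.mod_eq_emod_of_pos (by norm_num)

-- the shared mathematical object: k-fold iterate of one step Sum += Sum % 10
def gstep (s : Int) : Int := s + s % 10

def iterN (Sum : Int) (k : Nat) : Int := gstep^[k] Sum

def dig (Sum : Int) (k : Nat) : Int := iterN Sum k % 10

-- A's loop including the break (the break is redundant: gstep fixes digit-0 states)
def breakLoop (Sum : Int) : Nat → Int
  | 0 => Sum
  | Nat.succ m =>
    if PySem.Int.mod Sum 10 == 0 then Sum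
    else breakLoop (Sum + PySem.Int.mod Sum 10) m

-- sum of the first r elements of the increment pattern 2,4,8,6
def patPrefix : Nat → Int
  | 0 => 0
  | 1 => 2
  | 2 => 6
  | _ => 14

-- once the last digit is 2, the step-by-step loop adds the 2,4,8,6 cycle
theorem loopB_cycle : ∀ n s, s % 10 = 2 →
    breakLoop s n = s + 20 * ((n / 4 : Nat) : Int) + patPrefix (n % 4) := by
  intro n
  induction n using Nat.strong_induction_on with
  | _ n ih =>
    intro s hs
    match n, ih with
    | 0, _ => simp [breakLoop, patPrefix]
    | 1, _ =>
      simp only [breakLoop, mod_pos10, hs]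
      norm_num [patPrefix]
    | 2, _ =>
      have h2 : (s + 2) % 10 = 4 := by omega
      simp only [breakLoop, mod_pos10, hs, h2]
      norm_num [patPrefix]; ring
    | 3, _ =>
      have h2 : (s + 2) % 10 = 4 := by omega
      have h3 : (s + 2 + 4) % 10 = 8 := by omega
      simp only [breakLoop, mod_pos10, hs, h2, h3]
      norm_num [patPrefix]; ring
    | (m + 4), ih =>
      have h2 : (s + 2) % 10 = 4 := by omega
      have h3 : (s + 2 + 4) % 10 = 8 := by omega
      have h4 : (s + 2 + 4 + 8) % 10 = 6 := by omega
      have h5 : (s + 2 + 4 + 8 + 6) % 10 = 2 := by omega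
      have := ih m (by omega) (s + 2 + 4 + 8 + 6) h5
      simp only [breakLoop, mod_pos10, hs, h2, h3, h4]
      have hdiv : ((m + 4) / 4 : Nat) = m / 4 + 1 := by omega
      have hmod : ((m + 4) % 4 : Nat) = m % 4 := by omega
      rw [this, hdiv, hmod]
      push_cast
      ring

-- A's shortcut equals the remaining step-by-step iterations
theorem loopA_eq_breakLoop : ∀ (n : Nat) (K s : Int) (i : Nat), K - 2 = (i : Int) + n →
    mult3LoopA K s i n = breakLoop s n := by
  intro n
  induction n with
  | zero => intro K s i h; rfl
  | succ m ih =>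
    intro K s i h
    rw [mult3LoopA, breakLoop]
    by_cases h0 : PySem.Int.mod s 10 == 0
    · simp only [h0, if_true]
    · simp only [h0, if_false, Bool.false_eq_true]
      by_cases h2 : PySem.Int.mod s 10 == 2
      · simp only [h2, if_true]
        have hs : s % 10 = 2 := by
          have := (beq_iff_eq.mp h2); rwa [mod_pos10] at this
        have hL : K - ((i : Int) + 2) = ((m + 1 : Nat) : Int) := by push_cast; omega
        have hfd : PySem.Int.floordiv ((m + 1 : Nat) : Int) 4 = (((m + 1) / 4 : Nat) : Int) := by
          exact_mod_cast PySem.Int.floordiv_natCast (m + 1) 4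
        have hmd : PySem.Int.mod ((m + 1 : Nat) : Int) 4 = (((m + 1) % 4 : Nat) : Int) := by
          exact_mod_cast PySem.Int.mod_natCast (m + 1) 4
        have hstep : s + PySem.Int.mod s 10 = s + 2 := by rw [mod_pos10, hs]
        have hB : breakLoop (s + 2) m = breakLoop s (m + 1) := by
          simp only [breakLoop, mod_pos10, hs]
          norm_num
        rw [hL, hfd, hmd, hstep, hB, loopB_cycle (m + 1) s hs]
        set r : Nat := (m + 1) % 4 with hr
        have hr4 : r = 0 ∨ r = 1 ∨ r = 2 ∨ r = 3 := by omega
        rcases hr4 with h | h | h | h <;>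
          · rw [h]
            norm_num [PySem.List.pyRange, PySem.List.pyGet?, PySem.List.pyIdx?,
              patPrefix, List.range_succ, show ((2:Int).toNat) = 2 from rfl,
              show ((3:Int).toNat) = 3 from rfl]
            try omega
      · simp only [h2, if_false, Bool.false_eq_true]
        exact ih K (s + PySem.Int.mod s 10) (i + 1) (by push_cast; push_cast at h; omega)

theorem iterN_fixed (s : Int) (h : s % 10 = 0) : ∀ k, iterN s k = s := by
  intro k
  induction k with
  | zero => rfl
  | succ m ih =>
    have : gstep s = s := by unfold gstep; omega
    simpa [iterN, Function.iterate_succ_apply, this] using ih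

theorem breakLoop_eq_iterN : ∀ n s, breakLoop s n = iterN s n := by
  intro n
  induction n with
  | zero => intro s; rfl
  | succ m ih =>
    intro s
    rw [breakLoop]
    by_cases h0 : s % 10 = 0
    · simp only [mod_pos10, h0]
      norm_num [iterN_fixed s h0]
    · have : (PySem.Int.mod s 10 == 0) = false := by
        rw [mod_pos10]; simpa using h0
      rw [this]
      simp only [Bool.false_eq_true, if_false, mod_pos10, ih]
      simp [iterN, Function.iterate_succ_apply, gstep]

theorem iterN_succ (Sum : Int) (k : Nat) : iterN Sum (k + 1) = iterN Sum k + dig Sum k := by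
  simp only [iterN, dig, Function.iterate_succ_apply']
  rfl

-- a fold over a range whose body ignores the element is an iterate
theorem foldl_range_const {α : Type} (f : α → α) : ∀ (m : Nat) (init : α),
    (List.range m).foldl (fun a _ => f a) init = f^[m] init := by
  intro m
  induction m with
  | zero => intro init; rfl
  | succ k ih =>
    intro init
    rw [List.range_succ, List.foldl_append, ih, Function.iterate_succ_apply']
    rfl

theorem foldl_pyRange_const {α : Type} (f : α → α) (n : Int) (init : α) :
    (PySem.List.pyRange 0 n 1).foldl (fun a _ => f a) init = f^[n.toNat] init := by
  rw [PySem.List.pyRange_one, List.foldl_map]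
  simpa using foldl_range_const f (n - 0).toNat init

-- the head loop of B tracks the true iterate: inc = iterN k - Sum, s = iterN k mod 30
theorem headIter (Sum : Int) : ∀ k,
    (fun p : Int × Int => (p.1 + PySem.Int.mod p.2 10,
      PySem.Int.mod (p.2 + PySem.Int.mod p.2 10) 30))^[k] (0, PySem.Int.mod Sum 30)
    = (iterN Sum k - Sum, iterN Sum k % 30) := by
  intro k
  induction k with
  | zero => simp [iterN]
  | succ m ih =>
    rw [Function.iterate_succ_apply', ih]
    have hstep : iterN Sum (m + 1) = iterN Sum m + iterN Sum m % 10 := by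
      rw [iterN_succ]; rfl
    set a := iterN Sum m
    simp only [mod_pos10, mod_pos30, hstep, Prod.mk.injEq]
    constructor <;> omega

theorem dig_bounds (Sum : Int) (k : Nat) : 0 ≤ dig Sum k ∧ dig Sum k < 10 := by
  unfold dig; omega

theorem dig_succ (Sum : Int) (k : Nat) : dig Sum (k + 1) = 2 * dig Sum k % 10 := by
  unfold dig
  rw [iterN_succ]
  unfold dig; omega

-- every digit after the first step is even, and even digits are 4-periodic under doubling
theorem dig_period (Sum : Int) (k : Nat) : dig Sum (k + 1 + 4) = dig Sum (k + 1) := by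
  have h1 := dig_succ Sum k
  have h2 := dig_succ Sum (k + 1)
  have h3 := dig_succ Sum (k + 2)
  have h4 := dig_succ Sum (k + 3)
  have h5 := dig_succ Sum (k + 4)
  have hb := dig_bounds Sum k
  have b1 : dig Sum (k + 1 + 1) = dig Sum (k + 2) := rfl
  have b2 : dig Sum (k + 2 + 1) = dig Sum (k + 3) := rfl
  have b3 : dig Sum (k + 3 + 1) = dig Sum (k + 4) := rfl
  have b4 : dig Sum (k + 4 + 1) = dig Sum (k + 1 + 4) := rfl
  omega

-- any 4-digit window from index ≥ 36 has the same sum as the window at 36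
theorem window_const (Sum : Int) : ∀ i, 36 ≤ i →
    (∑ j ∈ Finset.range 4, dig Sum (i + j)) = ∑ j ∈ Finset.range 4, dig Sum (36 + j) := by
  intro i hi
  induction i, hi using Nat.le_induction with
  | base => rfl
  | succ i hi ih =>
    rw [← ih]
    have hp : dig Sum (i + 4) = dig Sum i := by
      obtain ⟨m, rfl⟩ : ∃ m, i = m + 1 := ⟨i - 1, by omega⟩
      exact dig_period Sum m
    simp only [Finset.sum_range_succ, Finset.sum_range_zero]
    have e1 : i + 1 + 1 = i + 2 := by omega
    have e2 : i + 1 + 2 = i + 3 := by omega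
    have e3 : i + 1 + 3 = i + 4 := by omega
    rw [e1, e2, e3, hp]
    ring

theorem iterN_split (Sum : Int) (a : Nat) : ∀ b,
    iterN Sum (a + b) = iterN Sum a + ∑ j ∈ Finset.range b, dig Sum (a + j) := by
  intro b
  induction b with
  | zero => simp
  | succ m ih =>
    have : a + (m + 1) = (a + m) + 1 := by omega
    rw [this, iterN_succ, ih, Finset.sum_range_succ]
    ring

theorem sum_dec (Sum : Int) : ∀ q r,
    (∑ i ∈ Finset.range (4 * q + r), dig Sum (36 + i))
      = q * (∑ j ∈ Finset.range 4, dig Sum (36 + j)) + ∑ j ∈ Finset.range r, dig Sum (36 + j) := by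
  intro q
  induction q with
  | zero => intro r; simp
  | succ m ih =>
    intro r
    have hn : 4 * (m + 1) + r = (4 * m + r) + 4 := by omega
    rw [hn]
    have hsplit : (∑ i ∈ Finset.range ((4 * m + r) + 4), dig Sum (36 + i))
        = (∑ i ∈ Finset.range (4 * m + r), dig Sum (36 + i))
          + ∑ j ∈ Finset.range 4, dig Sum (36 + (4 * m + r) + j) := by
      simp only [Finset.sum_range_succ, Finset.sum_range_zero]
      have a1 : 36 + (4 * m + r) + 1 = 36 + (4 * m + r + 1) := by omega
      have a2 : 36 + (4 * m + r) + 2 = 36 + (4 * m + r + 2) := by omega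
      have a3 : 36 + (4 * m + r) + 3 = 36 + (4 * m + r + 3) := by omega
      rw [a1, a2, a3]
      ring
    rw [hsplit, window_const Sum (36 + (4 * m + r)) (by omega), ih r]
    push_cast
    ring

theorem ifYN_congr (x y : Int) (h : x = y) :
    (if (PySem.Int.mod x 3 == 0) = true then "YES" else "NO")
      = (if (PySem.Int.mod y 3 == 0) = true then "YES" else "NO") := by rw [h]

-- ===== VERDICT (by name: the statement is the Claim_ definition above) =====
theorem Mult3_spec : Claim_equal_Mult3 := by
  intro K d0 d1 _
  unfold Spec_Mult3 Mult3 Mult3_alt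
  set Sum := d0 + d1 with hS
  set steps := K - 2 with hsteps
  -- A's final accumulator is the straight iterate
  have hA : mult3LoopA K Sum 0 steps.toNat = iterN Sum steps.toNat := by
    by_cases hK : 2 ≤ K
    · rw [loopA_eq_breakLoop steps.toNat K Sum 0 (by push_cast; omega),
        breakLoop_eq_iterN]
    · have h0 : steps.toNat = 0 := by omega
      rw [h0]; rfl
  rw [hA]
  -- the 4-step window loop runs on the literal range [0,1,2,3]
  have hr4 : PySem.List.pyRange 0 4 1 = [0, 1, 2, 3] := by decide
  rw [hr4]
  -- B's head loop is an iterate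
  simp only [foldl_pyRange_const, headIter]
  by_cases h36 : steps > 36
  · simp only [if_pos h36]
    have hmin : (min steps 36).toNat = 36 := by omega
    rw [hmin]
    set a := iterN Sum 36 with ha
    have hdig36 : dig Sum 36 = a % 10 := by unfold dig; rw [← ha]
    have h37 : iterN Sum 37 = a + dig Sum 36 := by rw [show 37 = 36 + 1 from rfl, iterN_succ]
    have h38 : iterN Sum 38 = iterN Sum 37 + dig Sum 37 := by rw [show 38 = 37 + 1 from rfl, iterN_succ]
    have h39 : iterN Sum 39 = iterN Sum 38 + dig Sum 38 := by rw [show 39 = 38 + 1 from rfl, iterN_succ]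
    have hdig37 : dig Sum 37 = iterN Sum 37 % 10 := rfl
    have hdig38 : dig Sum 38 = iterN Sum 38 % 10 := rfl
    have hdig39 : dig Sum 39 = iterN Sum 39 % 10 := rfl
    simp only [List.foldl]
    have hd36 : PySem.Int.mod (a % 30) 10 = dig Sum 36 := by rw [mod_pos10]; omega
    have hs37 : PySem.Int.mod (a % 30 + dig Sum 36) 30 = iterN Sum 37 % 30 := by
      rw [mod_pos30, h37]; omega
    have hd37 : PySem.Int.mod (iterN Sum 37 % 30) 10 = dig Sum 37 := by
      rw [mod_pos10]; omega
    have hs38 : PySem.Int.mod (iterN Sum 37 % 30 + dig Sum 37) 30 = iterN Sum 38 % 30 := by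
      rw [mod_pos30, h38]; omega
    have hd38 : PySem.Int.mod (iterN Sum 38 % 30) 10 = dig Sum 38 := by
      rw [mod_pos10]; omega
    have hs39 : PySem.Int.mod (iterN Sum 38 % 30 + dig Sum 38) 30 = iterN Sum 39 % 30 := by
      rw [mod_pos30, h39]; omega
    have hd39 : PySem.Int.mod (iterN Sum 39 % 30) 10 = dig Sum 39 := by
      rw [mod_pos10]; omega
    simp only [hd36, hs37, hd37, hs38, hd38, hs39, hd39]
    -- quotient and remainder of the remaining steps
    have hq : PySem.Int.floordiv (steps - 36) 4 = (steps - 36) / 4 :=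
      PySem.Int.floordiv_eq_ediv_of_pos (by norm_num)
    have hr : PySem.Int.mod (steps - 36) 4 = (steps - 36) % 4 := by
      exact PySem.Int.mod_eq_emod_of_pos (by norm_num)
    simp only [hq, hr]
    set qI : Int := (steps - 36) / 4 with hqI
    set rI : Int := (steps - 36) % 4 with hrI
    have htn : steps.toNat = 36 + (4 * qI.toNat + rI.toNat) := by
      have hd : steps - 36 = 4 * qI + rI := by rw [hqI, hrI]; omega
      omega
    have hwin : (∑ j ∈ Finset.range 4, dig Sum (36 + j))
        = dig Sum 36 + dig Sum 37 + dig Sum 38 + dig Sum 39 := by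
      simp only [Finset.sum_range_succ, Finset.sum_range_zero]
      norm_num
    have hval : iterN Sum steps.toNat
        = a + qI * (dig Sum 36 + dig Sum 37 + dig Sum 38 + dig Sum 39)
          + ∑ j ∈ Finset.range rI.toNat, dig Sum (36 + j) := by
      rw [htn, iterN_split, sum_dec, hwin, ← ha]
      have hqc : ((qI.toNat : Int)) = qI := by omega
      rw [hqc]
      ring
    apply ifYN_congr
    rw [hval]
    have hrcase : rI = 0 ∨ rI = 1 ∨ rI = 2 ∨ rI = 3 := by omega
    rcases hrcase with h | h | h | h <;>
      · simp only [h, show ((0:Int).toNat) = 0 from rfl, show ((1:Int).toNat) = 1 from rfl,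
          show ((2:Int).toNat) = 2 from rfl, show ((3:Int).toNat) = 3 from rfl,
          Finset.sum_range_succ, Finset.sum_range_zero]
        norm_num [PySem.List.pyRange, PySem.List.pyGet?, PySem.List.pyIdx?,
          List.range_succ, show ((2:Int).toNat) = 2 from rfl, show ((3:Int).toNat) = 3 from rfl]
        ring
  · simp only [if_neg h36]
    have hmin : (min steps 36).toNat = steps.toNat := by omega
    rw [hmin]
    norm_num
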